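-- pv_equiv track=rewrite | github.com/lawang24/competitive-programming-archive | Codeforces/old_code/may_20/A.py | solve
-- ===== SOURCE A (Python) =====
-- def solve(x,y):
--     count = 0
--
--     while x or y:
--         screen = 15
--         while screen > 7 and y:
--             y-=1
--             screen-=4
--         while screen>0 and x:
--             x-=1
--             screen-=1
--         count+=1
--
--     return count
-- ===== SOURCE B (Python) =====
-- def solve(x, y):
--     # Closed-form: each screen takes up to 2 y-items (4 units) then fills
--     # the rest (of 15 units) with x-items (1 unit each).
--     y_screens = (y + 1) // 2
--     x_left = x - (7 * (y // 2) + 11 * (y % 2))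
--     if x_left < 0:
--         x_left = 0
--     return y_screens + (x_left + 14) // 15
-- ===== Notes on version B (the rewrite author's own statement) =====
-- stated objective: faster
-- what changed: Replaced the item-by-item simulation of screens (three nested while loops decrementing x and y one at a time) by a closed-form arithmetic formula: ceil(y/2) y-screens, subtract the x-capacity they carry, then ceil of the remaining x over 15.
import Mathlib
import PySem

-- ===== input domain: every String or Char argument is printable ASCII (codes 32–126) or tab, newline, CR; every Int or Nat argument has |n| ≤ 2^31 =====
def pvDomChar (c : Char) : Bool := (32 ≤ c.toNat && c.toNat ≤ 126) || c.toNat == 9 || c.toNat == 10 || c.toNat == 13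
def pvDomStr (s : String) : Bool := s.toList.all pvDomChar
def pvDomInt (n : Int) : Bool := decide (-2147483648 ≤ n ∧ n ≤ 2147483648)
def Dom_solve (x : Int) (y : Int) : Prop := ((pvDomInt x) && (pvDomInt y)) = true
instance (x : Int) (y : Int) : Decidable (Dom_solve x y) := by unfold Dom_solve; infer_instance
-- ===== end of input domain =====

-- B replaces A's item-by-item screen simulation with O(1) closed-form arithmetic (objective: faster).

-- ===== PORT A =====
-- inner loop `while screen > 7 and y`
def loopY (screen y : Int) : Int × Int :=
  if screen > 7 ∧ y ≠ 0 then loopY (screen - 4) (y - 1) else (screen, y)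
termination_by (screen - 7).toNat
decreasing_by omega

-- inner loop `while screen > 0 and x`
def loopX (screen x : Int) : Int × Int :=
  if screen > 0 ∧ x ≠ 0 then loopX (screen - 1) (x - 1) else (screen, x)
termination_by screen.toNat
decreasing_by omega

-- outer loop `while x or y`; fuel bounds the iterations (A diverges for negative x or y,
-- which Pre_solve excludes; the fuel is sufficient on Pre_solve)
def loopMain : Nat → Int → Int → Int → Int
  | 0, _, _, count => count
  | fuel + 1, x, y, count =>
    if x ≠ 0 ∨ y ≠ 0 then
      let p := loopY 15 y
      let q := loopX p.1 x
      loopMain fuel q.2 p.2 (count + 1)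
    else count

def solve (x : Int) (y : Int) : Int :=
  loopMain (x.toNat + y.toNat) x y 0

-- ===== PORT B =====
def solve_alt (x : Int) (y : Int) : Int :=
  let y_screens := PySem.Int.floordiv (y + 1) 2
  let x_left := x - (7 * PySem.Int.floordiv y 2 + 11 * PySem.Int.mod y 2)
  let x_left' := if x_left < 0 then 0 else x_left
  y_screens + PySem.Int.floordiv (x_left' + 14) 15

-- ===== PRECONDITION & SPEC =====
-- A terminates exactly on non-negative x and y (a negative x or y is decremented forever).
def Pre_solve (x : Int) (y : Int) : Prop := 0 ≤ x ∧ 0 ≤ y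
instance (x : Int) (y : Int) : Decidable (Pre_solve x y) := by unfold Pre_solve; infer_instance
def pvWitness_solve : Int × Int := (23, 9)

def Spec_solve (x : Int) (y : Int) (out : Int) : Prop := out = solve_alt x y
instance (x : Int) (y : Int) (out : Int) : Decidable (Spec_solve x y out) := by unfold Spec_solve; infer_instance

-- ===== CLAIM (what is proved, stated in full; the proofs are below) =====
def Claim_equal_solve : Prop := ∀ (x : Int) (y : Int), Dom_solve x y → Pre_solve x y → Spec_solve x y (solve x y)

-- ===== LEMMAS AND PROOFS =====

lemma loopY_15 (y : Int) (hy : 0 ≤ y) :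
    loopY 15 y = if 2 ≤ y then (7, y - 2) else if y = 1 then (11, 0) else (15, 0) := by
  by_cases h2 : 2 ≤ y
  · rw [if_pos h2, loopY, if_pos ⟨by norm_num, by omega⟩, loopY,
        if_pos ⟨by norm_num, by omega⟩, loopY, if_neg (by norm_num)]
    norm_num
    omega
  · rw [if_neg h2]
    by_cases h1 : y = 1
    · subst h1
      rw [if_pos rfl, loopY, if_pos ⟨by norm_num, by norm_num⟩, loopY,
          if_neg (by norm_num)]
      norm_num
    · rw [if_neg h1]
      have hy0 : y = 0 := by omega
      subst hy0
      rw [loopY, if_neg (by norm_num)]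

lemma loopX_snd (s x : Int) (hs : 0 ≤ s) (hx : 0 ≤ x) :
    (loopX s x).2 = max (x - s) 0 := by
  induction s, x using loopX.induct with
  | case1 s x h ih =>
    rw [loopX, if_pos h]
    rw [ih (by omega) (by omega)]
    omega
  | case2 s x h =>
    rw [loopX, if_neg h]
    simp only []
    omega

-- closed form of solve_alt with Int ediv/emod, for omega
lemma solve_alt_eq (x y : Int) :
    solve_alt x y =
      (y + 1) / 2 + ((max (x - (7 * (y / 2) + 11 * (y % 2))) 0) + 14) / 15 := by
  have h2 : ∀ a : Int, PySem.Int.floordiv a 2 = a / 2 :=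
    fun a => PySem.Int.floordiv_eq_ediv_of_pos (by norm_num)
  have h15 : ∀ a : Int, PySem.Int.floordiv a 15 = a / 15 :=
    fun a => PySem.Int.floordiv_eq_ediv_of_pos (by norm_num)
  have hm2 : ∀ a : Int, PySem.Int.mod a 2 = a % 2 :=
    fun a => PySem.Int.mod_eq_emod_of_pos (by norm_num)
  simp only [solve_alt, h2, h15, hm2]
  split_ifs with h <;> omega

lemma loopMain_eq (fuel : Nat) : ∀ (x y c : Int), 0 ≤ x → 0 ≤ y →
    x.toNat + y.toNat ≤ fuel → loopMain fuel x y c = c + solve_alt x y := by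
  induction fuel with
  | zero =>
    intro x y c hx hy hf
    have hx0 : x = 0 := by omega
    have hy0 : y = 0 := by omega
    subst hx0; subst hy0
    simp [loopMain, solve_alt_eq]
  | succ fuel ih =>
    intro x y c hx hy hf
    by_cases h : x ≠ 0 ∨ y ≠ 0
    · show (if x ≠ 0 ∨ y ≠ 0 then _ else c) = _
      rw [if_pos h]
      simp only []
      rw [loopY_15 y hy]
      by_cases h2 : 2 ≤ y
      · rw [if_pos h2]
        simp only []
        rw [loopX_snd 7 x (by norm_num) hx]
        rw [ih (max (x - 7) 0) (y - 2) (c + 1) (by omega) (by omega) (by omega)]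
        rw [solve_alt_eq, solve_alt_eq]
        omega
      · rw [if_neg h2]
        by_cases h1 : y = 1
        · rw [if_pos h1]
          simp only []
          rw [loopX_snd 11 x (by norm_num) hx]
          rw [ih (max (x - 11) 0) 0 (c + 1) (by omega) (by omega) (by omega)]
          rw [solve_alt_eq, solve_alt_eq]
          subst h1
          omega
        · rw [if_neg h1]
          simp only []
          rw [loopX_snd 15 x (by norm_num) hx]
          have hy0 : y = 0 := by omega
          have hx0 : x ≠ 0 := by omega
          rw [ih (max (x - 15) 0) 0 (c + 1) (by omega) (by omega) (by omega)]
          rw [solve_alt_eq, solve_alt_eq]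
          subst hy0
          omega
    · show (if x ≠ 0 ∨ y ≠ 0 then _ else c) = _
      rw [if_neg h]
      push_neg at h
      obtain ⟨hx0, hy0⟩ := h
      subst hx0; subst hy0
      simp [solve_alt_eq]

-- ===== VERDICT (by name: the statement is the Claim_ definition above) =====
theorem solve_spec : Claim_equal_solve := by
  intro x y _ hpre
  obtain ⟨hx, hy⟩ := hpre
  show solve x y = solve_alt x y
  unfold solve
  rw [loopMain_eq (x.toNat + y.toNat) x y 0 hx hy (le_refl _)]
  omega
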